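-- pv_equiv track=rewrite | github.com/Mazzlabs/sys-scan-graph | agent/sys_scan_graph_agent/graph_nodes_scaffold.py | _check_baseline_routing
-- ===== SOURCE A (Python) =====
-- from typing import Any, Dict, List, Optional, Set, Tuple, TYPE_CHECKING
--
-- StateType = Dict[str, Any]  # type: ignore
--
-- def _batch_filter_findings_by_severity(fields: Dict[str, List[Any]], severity_levels: set) -> List[int]:
--     """Batch filter finding indices by severity levels."""
--     return [i for i, sev in enumerate(fields['severities']) if sev in severity_levels]
--
-- def _check_baseline_routing(fields: Dict[str, List[Any]], state: StateType) -> Optional[str]: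
--     """Check for high severity findings missing baseline and return routing decision."""
--     high_severity_indices = _batch_filter_findings_by_severity(fields, {'high', 'critical'})
--     if high_severity_indices:
--         baseline = state.get('baseline_results') or {}
--         # Check if any high-sev finding is missing baseline
--         for idx in high_severity_indices:
--             fid = fields['ids'][idx]
--             if fid and fid not in baseline:
--                 return 'baseline'
--     return None
-- ===== SOURCE B (Python) =====
-- def _check_baseline_routing(fields, state):
--     """Check for high severity findings missing baseline and return routing decision."""
--     baseline = state.get('baseline_results') or {}
--     for sev, fid in zip(fields['severities'], fields.get('ids', ())):
--         if sev in ('high', 'critical') and fid and fid not in baseline: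
--             return 'baseline'
--     return None
-- ===== Notes on version B (the rewrite author's own statement) =====
-- stated objective: simpler
-- what changed: B drops the index-building helper and the index-based second pass: it hoists the baseline lookup and does one fused pass over zip(severities, ids), returning 'baseline' at the first high/critical finding with a truthy id missing from baseline.
-- outside the precondition, e.g. on _check_baseline_routing({'severities': ['high', 'high'], 'ids': ['x']}, {}): A returns 'baseline', B returns 'baseline'
import Mathlib
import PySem

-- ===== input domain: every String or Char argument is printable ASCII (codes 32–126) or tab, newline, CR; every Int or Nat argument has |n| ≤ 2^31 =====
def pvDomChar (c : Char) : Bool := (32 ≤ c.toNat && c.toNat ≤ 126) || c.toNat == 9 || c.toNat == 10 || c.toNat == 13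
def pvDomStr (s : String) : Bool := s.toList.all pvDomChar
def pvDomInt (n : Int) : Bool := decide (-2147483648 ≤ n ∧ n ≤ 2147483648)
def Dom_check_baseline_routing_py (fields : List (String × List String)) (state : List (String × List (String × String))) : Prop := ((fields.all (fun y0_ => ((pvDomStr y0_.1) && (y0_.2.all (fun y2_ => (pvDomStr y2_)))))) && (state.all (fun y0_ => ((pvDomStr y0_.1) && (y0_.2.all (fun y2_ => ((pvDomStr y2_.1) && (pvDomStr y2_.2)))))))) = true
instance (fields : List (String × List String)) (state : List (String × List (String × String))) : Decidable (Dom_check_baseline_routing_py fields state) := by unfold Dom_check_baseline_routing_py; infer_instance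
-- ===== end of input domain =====

-- B replaces A's index-building helper + index-based second pass by one fused pass over zip(severities, ids); objective: simpler. Equivalence of RETURN values on Pre_.

-- ===== PORT A =====
-- port of _batch_filter_findings_by_severity with severity_levels = {'high','critical'}
def pvBatchFilterHigh (sevs : List String) : List Int :=
  ((PySem.List.enumerate sevs 0).filter (fun p => p.2 == "high" || p.2 == "critical")).map (·.1)

-- port of A's 'for idx in high_severity_indices' loop
def pvLoopA (ids : List String) (baseline : PySem.Dict String String) : List Int → Option String
  | [] => none
  | idx :: rest =>
      let fid := (PySem.List.pyGet? ids idx).getD ""   -- in range under Pre_ (Python raises IndexError outside)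
      if fid != "" && !(baseline.contains fid) then some "baseline" else pvLoopA ids baseline rest

def check_baseline_routing_py (fields : List (String × List String)) (state : List (String × List (String × String))) : Option String :=
  let highIdx := pvBatchFilterHigh (((PySem.Dict.mk fields).get? "severities").getD [])
  if highIdx.isEmpty then none
  else
    let baseline := PySem.Dict.mk (((PySem.Dict.mk state).get? "baseline_results").getD [])  -- state.get(...) or {}
    pvLoopA (((PySem.Dict.mk fields).get? "ids").getD []) baseline highIdx

-- ===== PORT B =====
def pvLoopB (baseline : PySem.Dict String String) : List (String × String) → Option String
  | [] => none
  | (sev, fid) :: rest =>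
      if (sev == "high" || sev == "critical") && fid != "" && !(baseline.contains fid) then some "baseline"
      else pvLoopB baseline rest

def check_baseline_routing_py_alt (fields : List (String × List String)) (state : List (String × List (String × String))) : Option String :=
  let baseline := PySem.Dict.mk (((PySem.Dict.mk state).get? "baseline_results").getD [])
  pvLoopB baseline ((((PySem.Dict.mk fields).get? "severities").getD []).zip (((PySem.Dict.mk fields).get? "ids").getD []))

-- ===== PRECONDITION & SPEC =====
-- Pre_ restricts to the module's natural table shape: 'severities' present, and every high/critical position covered
-- by the 'ids' array; outside it A raises KeyError/IndexError, or returns only by accident of early-return order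
-- (A stops at the first missing-baseline hit before reaching an out-of-range index), where B's single zip pass truncates.
def Pre_check_baseline_routing_py (fields : List (String × List String)) (state : List (String × List (String × String))) : Prop :=
  ((PySem.Dict.mk fields).get? "severities").isSome = true ∧
  ∀ p ∈ PySem.List.enumerate (((PySem.Dict.mk fields).get? "severities").getD []) 0,
    (p.2 == "high" || p.2 == "critical") = true →
      p.1 < ((((PySem.Dict.mk fields).get? "ids").getD []).length : Int)
instance (fields : List (String × List String)) (state : List (String × List (String × String))) : Decidable (Pre_check_baseline_routing_py fields state) := by unfold Pre_check_baseline_routing_py; infer_instance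

def pvWitness_check_baseline_routing_py : (List (String × List String)) × (List (String × List (String × String))) :=
  ([("severities", ["high", "low"]), ("ids", ["f1", "f2"])], [("baseline_results", [("f2", "ok")])])

def Spec_check_baseline_routing_py (fields : List (String × List String)) (state : List (String × List (String × String))) (out : Option String) : Prop := out = check_baseline_routing_py_alt fields state
instance (fields : List (String × List String)) (state : List (String × List (String × String))) (out : Option String) : Decidable (Spec_check_baseline_routing_py fields state out) := by unfold Spec_check_baseline_routing_py; infer_instance

-- ===== CLAIM (what is proved, stated in full; the proofs are below) =====
def Claim_equal_check_baseline_routing_py : Prop := ∀ (fields : List (String × List String)) (state : List (String × List (String × String))), Dom_check_baseline_routing_py fields state → Pre_check_baseline_routing_py fields state → Spec_check_baseline_routing_py fields state (check_baseline_routing_py fields state)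

-- ===== LEMMAS AND PROOFS =====

-- If no severity in the (remaining) list is high/critical, B's loop returns none.
lemma pvLoopB_none (b : PySem.Dict String String) :
    ∀ (sevs ids : List String),
      (∀ s ∈ sevs, ¬ (s == "high" || s == "critical") = true) →
      pvLoopB b (sevs.zip ids) = none := by
  intro sevs
  induction sevs with
  | nil => intro ids _; simp [pvLoopB]
  | cons s rest ih =>
      intro ids h
      cases ids with
      | nil => simp [pvLoopB]
      | cons fid ids' =>
          have hs := h s (List.mem_cons_self ..)
          simp only [List.zip_cons_cons, pvLoopB]
          rw [if_neg (by simp_all)]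
          exact ih ids' (fun x hx => h x (List.mem_cons_of_mem _ hx))

-- Every index produced by enumerate from k is at least k.
lemma pvEnumLB : ∀ (l : List String) (k : Int) (p : Int × String), p ∈ PySem.List.enumerate l k → k ≤ p.1 := by
  intro l
  induction l with
  | nil => simp [PySem.List.enumerate_nil]
  | cons x xs ih =>
      intro k p hp
      rw [PySem.List.enumerate_cons] at hp
      rcases List.mem_cons.mp hp with rfl | h
      · simp
      · have := ih (k + 1) p h; omega

-- The heart: A's loop over filtered enumerate-indices into the full ids list equals B's fused zip pass,
-- provided every high/critical index lands inside the full list.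
lemma pvLoop_eq (b : PySem.Dict String String) :
    ∀ (sevs ids pre : List String),
      (∀ p ∈ PySem.List.enumerate sevs (pre.length : Int),
          (p.2 == "high" || p.2 == "critical") = true → p.1 < (((pre ++ ids).length : Nat) : Int)) →
      pvLoopA (pre ++ ids) b
        (((PySem.List.enumerate sevs (pre.length : Int)).filter (fun p => p.2 == "high" || p.2 == "critical")).map (·.1))
        = pvLoopB b (sevs.zip ids) := by
  intro sevs
  induction sevs with
  | nil => intro ids pre _; simp [PySem.List.enumerate_nil, pvLoopA, pvLoopB]
  | cons s rest ih =>
      intro ids pre h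
      cases ids with
      | nil =>
          have hf : (PySem.List.enumerate (s :: rest) (pre.length : Int)).filter
              (fun p => p.2 == "high" || p.2 == "critical") = [] := by
            rw [List.filter_eq_nil_iff]
            intro p hp hhi
            have h1 := pvEnumLB (s :: rest) (pre.length : Int) p hp
            have h2 := h p hp hhi
            simp at h2
            omega
          rw [List.append_nil, hf]
          simp [pvLoopA, pvLoopB]
      | cons fid ids' =>
          have hget : (PySem.List.pyGet? (pre ++ fid :: ids') ((pre.length : Int))).getD "" = fid := by
            rw [PySem.List.pyGet?_natCast]
            simp
          have h' : ∀ p ∈ PySem.List.enumerate rest (((pre ++ [fid]).length : Nat) : Int),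
              (p.2 == "high" || p.2 == "critical") = true →
              p.1 < ((((pre ++ [fid]) ++ ids').length : Nat) : Int) := by
            intro p hp hhi
            have hmem : p ∈ PySem.List.enumerate (s :: rest) (pre.length : Int) := by
              rw [PySem.List.enumerate_cons]
              refine List.mem_cons_of_mem _ ?_
              rw [show ((pre ++ [fid]).length : Int) = (pre.length : Int) + 1 by
                rw [List.length_append, List.length_singleton]; push_cast; ring] at hp
              exact hp
            have := h p hmem hhi
            simpa [List.length_append] using this
          have key := ih ids' (pre ++ [fid]) h'
          rw [show ((pre ++ [fid]).length : Int) = (pre.length : Int) + 1 by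
            rw [List.length_append, List.length_singleton]; push_cast; ring] at key
          rw [show (pre ++ [fid]) ++ ids' = pre ++ fid :: ids' by simp] at key
          rw [PySem.List.enumerate_cons]
          by_cases hs : (s == "high" || s == "critical") = true
          · rw [List.filter_cons_of_pos (by simpa using hs), List.map_cons]
            simp only [pvLoopA, pvLoopB, hget, List.zip_cons_cons, hs, Bool.true_and]
            rw [key]
          · rw [List.filter_cons_of_neg (by simpa using hs), List.zip_cons_cons]
            simp only [pvLoopB]
            rw [Bool.not_eq_true] at hs
            rw [hs, Bool.false_and, if_neg (by simp), key]

-- If the filtered index list is empty, no severity is high/critical.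
lemma pvNoHigh_of_filter_nil :
    ∀ (sevs : List String) (k : Int),
      ((PySem.List.enumerate sevs k).filter (fun p => p.2 == "high" || p.2 == "critical")) = [] →
      ∀ s ∈ sevs, ¬ (s == "high" || s == "critical") = true := by
  intro sevs
  induction sevs with
  | nil => intro k _ s hs; simp at hs
  | cons x rest ih =>
      intro k h s hs
      rw [PySem.List.enumerate_cons] at h
      simp only [List.filter_cons] at h
      by_cases hx : (x == "high" || x == "critical") = true
      · simp [hx] at h
      · rcases List.mem_cons.mp hs with rfl | hmem
        · exact hx
        · exact ih (k + 1) (by simpa [hx] using h) s hmem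

-- ===== VERDICT (by name: the statement is the Claim_ definition above) =====
theorem check_baseline_routing_py_spec : Claim_equal_check_baseline_routing_py := by
  intro fields state _ hpre
  obtain ⟨_, hidx⟩ := hpre
  unfold Spec_check_baseline_routing_py check_baseline_routing_py check_baseline_routing_py_alt pvBatchFilterHigh
  set sevs := ((PySem.Dict.mk fields).get? "severities").getD [] with hsevs
  set ids := ((PySem.Dict.mk fields).get? "ids").getD [] with hids
  set b := PySem.Dict.mk (((PySem.Dict.mk state).get? "baseline_results").getD []) with hb
  by_cases hemp : (((PySem.List.enumerate sevs 0).filter (fun p => p.2 == "high" || p.2 == "critical")).map (·.1)).isEmpty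
  · rw [if_pos hemp]
    have hnil : ((PySem.List.enumerate sevs 0).filter (fun p => p.2 == "high" || p.2 == "critical")) = [] := by
      simpa [List.isEmpty_iff] using hemp
    exact (pvLoopB_none b sevs ids (pvNoHigh_of_filter_nil sevs 0 hnil)).symm
  · rw [if_neg hemp]
    have harg : ∀ p ∈ PySem.List.enumerate sevs ((([] : List String).length : Int)),
        (p.2 == "high" || p.2 == "critical") = true → p.1 < (((([] : List String) ++ ids).length : Nat) : Int) := by
      intro p hp hhi
      have := hidx p (by simpa using hp) hhi
      simpa using this
    have := pvLoop_eq b sevs ids [] harg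
    simpa using this
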